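-- pv_equiv track=rewrite | github.com/gsomani/pyrun | _includes/py/pratyahar.py | convert_to_set
-- ===== SOURCE A (Python) =====
-- sutra = ["अइउण्","ऋऌक्","एओङ्","ऐऔच्","हयवरट्","लण्","ञमङणनम्","झभञ्","घढधष्","जबगडदश्","खफछठथचटतव्","कपय्","शषसर्","हल्"]
--
-- def convert_to_set(num):
--     pratyahar = []
--     unicode_start = ord(sutra[0][0]) & 0xFF00
--     i = 0
--     while(num):
--         if(num & 1):
--             pratyahar.append(chr(unicode_start | i))
--         num = num >> 1
--         i += 1
--     return pratyahar
-- ===== SOURCE B (Python) =====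
-- def convert_to_set(num):
--     # unicode_start = ord(sutra[0][0]) & 0xFF00 == 0x0900 (Devanagari block base)
--     out = []
--     while num:
--         lsb = num & (num ^ (num - 1))      # lowest set bit
--         out.append(chr(0x0900 | (lsb.bit_length() - 1)))
--         num ^= lsb
--     return out
-- ===== Notes on version B (the rewrite author's own statement) =====
-- stated objective: alternative
-- what changed: B iterates only over the set bits of num (extract lowest set bit, emit chr(0x900 | its position), clear it) instead of A's per-position scan that tests and shifts every bit.
import Mathlib
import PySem

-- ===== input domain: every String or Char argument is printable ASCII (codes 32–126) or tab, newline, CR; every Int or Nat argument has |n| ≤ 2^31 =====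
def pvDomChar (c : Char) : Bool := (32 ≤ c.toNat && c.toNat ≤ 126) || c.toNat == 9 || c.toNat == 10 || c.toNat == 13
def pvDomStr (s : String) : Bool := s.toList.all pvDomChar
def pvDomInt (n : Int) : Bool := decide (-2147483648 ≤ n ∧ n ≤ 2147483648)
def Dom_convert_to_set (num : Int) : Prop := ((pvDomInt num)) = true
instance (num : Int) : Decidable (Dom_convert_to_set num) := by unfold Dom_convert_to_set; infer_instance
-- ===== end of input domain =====

-- B enumerates only the set bits of num (lowest-set-bit extraction) instead of scanning
-- every bit position; same return value, constant-factor mechanism only on sparse inputs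
-- (objective: alternative).

-- ===== PORT A =====
def sutraA : List String :=
  ["अइउण्","ऋऌक्","एओङ्","ऐऔच्","हयवरट्","लण्","ञमङणनम्","झभञ्","घढधष्","जबगडदश्","खफछठथचटतव्","कपय्","शषसर्","हल्"]

-- ord(sutra[0][0]) & 0xFF00
def unicodeStartA : Nat := ((sutraA[0]!).toList[0]!).toNat &&& 0xFF00

-- the while loop of A: test bit 0, shift right, count positions
def convert_to_set_go (n i : Nat) (acc : List String) : List String :=
  if n = 0 then acc
  else
    convert_to_set_go (n >>> 1) (i + 1)
      (if n &&& 1 ≠ 0 then acc ++ [String.mk [Char.ofNat (unicodeStartA ||| i)]] else acc)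
termination_by n
decreasing_by simp only [Nat.shiftRight_one]; omega

-- Python's loop never terminates for num < 0 (excluded by Pre_); .toNat is exact for num ≥ 0.
def convert_to_set (num : Int) : List String := convert_to_set_go num.toNat 0 []

-- ===== PORT B =====
-- termination support for the port below (cited by name in decreasing_by)
theorem pv_clear_lt (n : Nat) : 0 < n → n ^^^ (n &&& (n ^^^ (n - 1))) < n := by
  induction n using Nat.strong_induction_on with
  | _ n ih =>
    intro hn
    rcases Nat.even_or_odd n with he | ho
    · obtain ⟨m, hm⟩ := he
      have hm2 : n = 2 * m := by omega
      have hmpos : 0 < m := by omega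
      obtain ⟨k, hk⟩ : ∃ k, m = k + 1 := ⟨m - 1, by omega⟩
      have h1 : 2 * m - 1 = 2 * k + 1 := by omega
      have hx : n ^^^ (n - 1) = 2 * (m ^^^ k) + 1 := by
        rw [hm2, h1]
        simpa [Nat.bit_false_apply, Nat.bit_true_apply] using Nat.xor_bit false m true k
      have ha : n &&& (2 * (m ^^^ k) + 1) = 2 * (m &&& (m ^^^ k)) := by
        rw [hm2]
        simpa [Nat.bit_false_apply, Nat.bit_true_apply] using Nat.land_bit false m true (m ^^^ k)
      have hk' : k = m - 1 := by omega
      have hc : n ^^^ (2 * (m &&& (m ^^^ (m - 1)))) = 2 * (m ^^^ (m &&& (m ^^^ (m - 1)))) := by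
        rw [hm2]
        simpa [Nat.bit_false_apply] using
          Nat.xor_bit false m false (m &&& (m ^^^ (m - 1)))
      rw [hx, ha, hk', hc]
      have := ih m (by omega) hmpos
      omega
    · obtain ⟨m, hm⟩ := ho
      have h1 : 2 * m + 1 - 1 = 2 * m := by omega
      have hx : n ^^^ (n - 1) = 1 := by
        rw [hm, h1]
        simpa [Nat.bit_false_apply, Nat.bit_true_apply] using Nat.xor_bit true m false m
      have ha : n &&& 1 = 1 := by
        rw [hm]
        simpa [Nat.bit_true_apply] using Nat.land_bit true m true 0
      have hc : n ^^^ 1 = 2 * m := by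
        rw [hm]
        simpa [Nat.bit_true_apply, Nat.bit_false_apply] using Nat.xor_bit true m true 0
      rw [hx, ha, hc]
      omega

-- the while loop of B: extract the lowest set bit, emit its position, clear it
def convert_to_set_alt_go (n : Nat) (acc : List String) : List String :=
  if h : n = 0 then acc
  else
    let lsb := n &&& (n ^^^ (n - 1))
    -- lsb.bit_length() - 1 = Nat.log2 lsb (exact: lsb ≥ 1 here)
    convert_to_set_alt_go (n ^^^ lsb) (acc ++ [String.mk [Char.ofNat (0x900 ||| Nat.log2 lsb)]])
termination_by n
decreasing_by exact pv_clear_lt n (Nat.pos_of_ne_zero h)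

-- Python's loop never terminates for num < 0 (excluded by Pre_); .toNat is exact for num ≥ 0.
def convert_to_set_alt (num : Int) : List String := convert_to_set_alt_go num.toNat []

-- ===== PRECONDITION & SPEC =====
-- Pre_: A's while loop (num >> 1 on a negative int stays negative) diverges for num < 0,
-- so only num ≥ 0 is admitted.
def Pre_convert_to_set (num : Int) : Prop := 0 ≤ num
instance (num : Int) : Decidable (Pre_convert_to_set num) := by
  unfold Pre_convert_to_set; infer_instance

def pvWitness_convert_to_set : Int := (13)

def Spec_convert_to_set (num : Int) (out : List String) : Prop := out = convert_to_set_alt num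
instance (num : Int) (out : List String) : Decidable (Spec_convert_to_set num out) := by
  unfold Spec_convert_to_set; infer_instance

-- ===== CLAIM (what is proved, stated in full; the proofs are below) =====
def Claim_equal_convert_to_set : Prop :=
  ∀ (num : Int), Dom_convert_to_set num → Pre_convert_to_set num →
    Spec_convert_to_set num (convert_to_set num)

-- ===== LEMMAS AND PROOFS =====

-- lowest set bit, as B computes it
def pvLsb (n : Nat) : Nat := n &&& (n ^^^ (n - 1))

-- the common specification: one string per set bit of n, low to high, positions offset by i
def pvBits (n i : Nat) : List String :=
  if n = 0 then []
  else (if n % 2 = 1 then [String.mk [Char.ofNat (0x900 ||| i)]] else []) ++ pvBits (n / 2) (i + 1)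
termination_by n
decreasing_by omega

theorem pv_unicodeStartA : unicodeStartA = 0x900 := by decide

theorem pvLsb_odd (n : Nat) (h : n % 2 = 1) : pvLsb n = 1 := by
  obtain ⟨m, hm⟩ : ∃ m, n = 2 * m + 1 := ⟨n / 2, by omega⟩
  have h1 : 2 * m + 1 - 1 = 2 * m := by omega
  have hx : n ^^^ (n - 1) = 1 := by
    rw [hm, h1]
    simpa [Nat.bit_false_apply, Nat.bit_true_apply] using Nat.xor_bit true m false m
  unfold pvLsb
  rw [hx, hm]
  simpa [Nat.bit_true_apply] using Nat.land_bit true m true 0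

theorem pv_clear_odd (n : Nat) (h : n % 2 = 1) : n ^^^ pvLsb n = n - 1 := by
  obtain ⟨m, hm⟩ : ∃ m, n = 2 * m + 1 := ⟨n / 2, by omega⟩
  rw [pvLsb_odd n h, hm]
  have hx : (2 * m + 1) ^^^ 1 = 2 * m := by
    simpa [Nat.bit_true_apply, Nat.bit_false_apply] using Nat.xor_bit true m true 0
  rw [hx]
  omega

theorem pvLsb_even (m : Nat) (h : 0 < m) : pvLsb (2 * m) = 2 * pvLsb m := by
  obtain ⟨k, hk⟩ : ∃ k, m = k + 1 := ⟨m - 1, by omega⟩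
  have h1 : 2 * m - 1 = 2 * k + 1 := by omega
  have hx : (2 * m) ^^^ (2 * m - 1) = 2 * (m ^^^ k) + 1 := by
    rw [h1]
    simpa [Nat.bit_false_apply, Nat.bit_true_apply] using Nat.xor_bit false m true k
  have ha : (2 * m) &&& (2 * (m ^^^ k) + 1) = 2 * (m &&& (m ^^^ k)) := by
    simpa [Nat.bit_false_apply, Nat.bit_true_apply] using Nat.land_bit false m true (m ^^^ k)
  have hk' : k = m - 1 := by omega
  unfold pvLsb
  rw [hx, ha, hk']

theorem pv_clear_even (m : Nat) (h : 0 < m) :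
    (2 * m) ^^^ pvLsb (2 * m) = 2 * (m ^^^ pvLsb m) := by
  rw [pvLsb_even m h]
  simpa [Nat.bit_false_apply] using Nat.xor_bit false m false (pvLsb m)

theorem pvLsb_pos (n : Nat) : 0 < n → 0 < pvLsb n := by
  induction n using Nat.strong_induction_on with
  | _ n ih =>
    intro hn
    rcases Nat.even_or_odd n with he | ho
    · obtain ⟨m, hm⟩ := he
      have hm2 : n = 2 * m := by omega
      have := ih m (by omega) (by omega)
      rw [hm2, pvLsb_even m (by omega)]
      omega
    · rw [pvLsb_odd n (Nat.odd_iff.mp ho)]; omega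

theorem pv_log2_double (x : Nat) (h : 0 < x) : Nat.log2 (2 * x) = Nat.log2 x + 1 := by
  rw [Nat.log2_eq_log_two, Nat.log2_eq_log_two, show 2 * x = x * 2 by ring,
    Nat.log_mul_base (by norm_num) (by omega)]

theorem pvBits_even (m i : Nat) : pvBits (2 * m) i = pvBits m (i + 1) := by
  rcases Nat.eq_zero_or_pos m with h | h
  · subst h; rw [pvBits, pvBits]; simp
  · rw [pvBits]
    simp [show ¬(2 * m = 0) by omega, Nat.mul_div_cancel_left m (by norm_num : 0 < 2),
      Nat.mul_mod_right]

theorem pvBits_step (n : Nat) : ∀ i, 0 < n →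
    pvBits n i =
      String.mk [Char.ofNat (0x900 ||| (i + Nat.log2 (pvLsb n)))] :: pvBits (n ^^^ pvLsb n) i := by
  induction n using Nat.strong_induction_on with
  | _ n ih =>
    intro i hn
    rcases Nat.even_or_odd n with he | ho
    · obtain ⟨m, hm⟩ := he
      have hm2 : n = 2 * m := by omega
      have hmpos : 0 < m := by omega
      subst hm2
      rw [pvBits_even, ih m (by omega) (i + 1) hmpos, pv_clear_even m hmpos, pvBits_even,
        pvLsb_even m hmpos, pv_log2_double (pvLsb m) (pvLsb_pos m hmpos)]
      have hidx : i + 1 + Nat.log2 (pvLsb m) = i + (Nat.log2 (pvLsb m) + 1) := by omega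
      rw [hidx]
    · have ho' : n % 2 = 1 := Nat.odd_iff.mp ho
      have hl1 : pvLsb n = 1 := pvLsb_odd n ho'
      have hc0 : n ^^^ pvLsb n = n - 1 := pv_clear_odd n ho'
      have hc : n ^^^ pvLsb n = 2 * (n / 2) := by omega
      rw [hc, pvBits_even, hl1, pvBits]
      simp [show ¬(n = 0) by omega, ho', Nat.log2_eq_log_two, Nat.log_one_right]

theorem convert_to_set_go_eq (n : Nat) : ∀ i acc,
    convert_to_set_go n i acc = acc ++ pvBits n i := by
  induction n using Nat.strong_induction_on with
  | _ n ih =>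
    intro i acc
    rw [convert_to_set_go, pvBits]
    rcases Nat.eq_zero_or_pos n with h | h
    · simp [h]
    · have hne : ¬(n = 0) := by omega
      have hand : n &&& 1 = n % 2 := Nat.and_one_is_mod n
      have hsh : n >>> 1 = n / 2 := Nat.shiftRight_one n
      simp only [hne, if_neg, if_false, hand, hsh]
      rw [ih (n / 2) (by omega)]
      rcases Nat.mod_two_eq_zero_or_one n with hp | hp
      · simp [hp]
      · simp [hp, pv_unicodeStartA]

theorem convert_to_set_alt_go_eq (n : Nat) : ∀ acc,
    convert_to_set_alt_go n acc = acc ++ pvBits n 0 := by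
  induction n using Nat.strong_induction_on with
  | _ n ih =>
    intro acc
    rw [convert_to_set_alt_go]
    rcases Nat.eq_zero_or_pos n with h | h
    · simp [h, pvBits]
    · have hne : ¬(n = 0) := by omega
      simp only [hne, dif_neg, if_false]
      rw [ih (n ^^^ (n &&& (n ^^^ (n - 1)))) (pv_clear_lt n h)]
      rw [pvBits_step n 0 h]
      simp [pvLsb]

-- ===== VERDICT (by name: the statement is the Claim_ definition above) =====
theorem convert_to_set_spec : Claim_equal_convert_to_set := by
  intro num _ _
  unfold Spec_convert_to_set convert_to_set convert_to_set_alt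
  rw [convert_to_set_go_eq, convert_to_set_alt_go_eq]
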